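-- pv_equiv track=rewrite | github.com/bubpen/codekata | 프로그래머스/0/181872. 특정 문자열로 끝나는 가장 긴 부분 문자열 찾기/특정 문자열로 끝나는 가장 긴 부분 문자열 찾기.py | solution
-- ===== SOURCE A (Python) =====
-- def solution(myString, pat):
--     answer = ''
--     c = myString.count(pat)
--     for i in myString:
--         if answer.count(pat) == c:
--             break
--         else:
--             answer = answer + i
--     return answer
-- ===== SOURCE B (Python) =====
-- import re
--
-- def solution(myString, pat):
--     end = 0
--     for m in re.finditer(re.escape(pat), myString):
--         end = m.end()
--     return myString[:end]
-- ===== Notes on version B (the rewrite author's own statement) =====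
-- stated objective: idiomatic
-- what changed: B finds the non-overlapping occurrences directly with re.finditer(re.escape(pat), ...) and slices the string at the end of the last match, instead of growing a prefix character by character and recounting the pattern in it at every step.
import Mathlib
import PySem

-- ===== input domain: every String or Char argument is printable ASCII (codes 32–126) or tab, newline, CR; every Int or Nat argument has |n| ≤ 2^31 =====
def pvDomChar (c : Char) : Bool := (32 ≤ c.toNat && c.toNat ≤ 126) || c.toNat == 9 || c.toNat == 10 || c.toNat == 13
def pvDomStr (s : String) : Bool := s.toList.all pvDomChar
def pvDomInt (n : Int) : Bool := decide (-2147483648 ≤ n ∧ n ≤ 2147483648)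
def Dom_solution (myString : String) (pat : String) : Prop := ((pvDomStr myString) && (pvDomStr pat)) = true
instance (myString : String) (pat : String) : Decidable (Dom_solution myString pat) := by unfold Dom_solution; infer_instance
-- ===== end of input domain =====

-- B enumerates the non-overlapping pattern occurrences directly (finditer-style scan) and slices at the last match end, instead of growing a prefix and recounting the pattern in it at every step.


-- ===== PORT A =====
-- A grows a prefix char by char until its pat-count reaches the pat-count of the whole string.
def solLoopA (pat : List Char) (c : Nat) : List Char → List Char → List Char
  | [], answer => answer
  | i :: rest, answer =>
    if PySem.Chars.count answer pat = c then answer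
    else solLoopA pat c rest (answer ++ [i])

def solution (myString : String) (pat : String) : String :=
  String.ofList (solLoopA pat.toList (PySem.Chars.count myString.toList pat.toList)
    myString.toList [])

-- ===== PORT B =====
-- B's re.finditer loop: scan for the literal pattern left to right (advancing past each
-- match, by one position after a zero-width match, exactly finditer's rule), remembering
-- the absolute end of the last match seen; `off` is the absolute offset of the current
-- suffix, `acc` the last end seen so far (0 before any match).
def lastEndB (pat : List Char) : List Char → Nat → Nat → Nat
  | [], off, acc => if pat.isEmpty then off else acc
  | l@(_ :: _), off, acc =>
    let i := PySem.Chars.find l pat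
    if i < 0 then acc
    else
      let stepped := i.toNat + max pat.length 1
      lastEndB pat (l.drop stepped) (off + stepped) (off + i.toNat + pat.length)
  termination_by l => l.length
  decreasing_by simp_all; omega

-- myString[:end] with 0 ≤ end is exactly List.take end.
def solution_alt (myString : String) (pat : String) : String :=
  String.ofList (myString.toList.take (lastEndB pat.toList myString.toList 0 0))

-- ===== PRECONDITION & SPEC =====
def Spec_solution (myString : String) (pat : String) (out : String) : Prop := out = solution_alt myString pat
instance (myString : String) (pat : String) (out : String) : Decidable (Spec_solution myString pat out) := by unfold Spec_solution; infer_instance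

-- ===== CLAIM (what is proved, stated in full; the proofs are below) =====
def Claim_equal_solution : Prop := ∀ (myString : String) (pat : String), Dom_solution myString pat → Spec_solution myString pat (solution myString pat)

-- ===== LEMMAS AND PROOFS =====

-- Fuel-free version of PySem.Chars.count's greedy non-overlapping scan (for pat ≠ []).
def cnt (p : List Char) : List Char → Nat
  | [] => 0
  | x :: t => if p.isPrefixOf (x :: t) then cnt p ((x :: t).drop (max p.length 1)) + 1 else cnt p t
  termination_by l => l.length
  decreasing_by all_goals simp

theorem countGo_eq_cnt (p : List Char) (hp : p ≠ []) :
    ∀ (fuel : Nat) (l : List Char) (acc : Nat), l.length ≤ fuel →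
      PySem.Chars.count.go p fuel l acc = acc + cnt p l := by
  intro fuel
  induction fuel with
  | zero =>
    intro l acc h
    have : l = [] := List.eq_nil_of_length_eq_zero (Nat.le_zero.mp h)
    subst this
    simp [PySem.Chars.count.go, cnt]
  | succ n ih =>
    intro l acc h
    match l with
    | [] => simp [PySem.Chars.count.go, cnt]
    | x :: t =>
      by_cases hpre : p.isPrefixOf (x :: t)
      · have hlen : 1 ≤ p.length := by
          cases p with
          | nil => exact absurd rfl hp
          | cons a b => simp
        rw [PySem.Chars.count.go, if_pos hpre, ih _ _ (by simp at h ⊢; omega)]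
        rw [cnt, if_pos hpre]
        have hmax : max p.length 1 = p.length := by omega
        rw [hmax]
        omega
      · rw [PySem.Chars.count.go, if_neg hpre, ih _ _ (by simp at h ⊢; omega)]
        rw [cnt, if_neg hpre]

theorem count_eq_cnt (p : List Char) (hp : p ≠ []) (l : List Char) :
    PySem.Chars.count l p = cnt p l := by
  have : p.isEmpty = false := by cases p <;> simp_all
  rw [PySem.Chars.count, this]
  simp [countGo_eq_cnt p hp l.length l 0 (le_refl _)]

theorem cnt_zero_of_no_infix (p : List Char) (l : List Char)
    (h : ¬ p <:+: l) : cnt p l = 0 := by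
  induction l with
  | nil => simp [cnt]
  | cons x t ih =>
    rw [cnt, if_neg ?_]
    · exact ih (fun hinf => h (hinf.trans (List.suffix_cons x t).isInfix))
    · intro hpre
      exact h ((List.isPrefixOf_iff_prefix.mp hpre).isInfix)

-- a prefix test only looks at the first |p| characters past the window
theorem prefix_append_iff (p w x : List Char) (hw : p.length ≤ w.length) :
    p <+: w ++ x ↔ p <+: w := by
  constructor
  · intro hpw
    have h1 : p = (w ++ x).take p.length := List.prefix_iff_eq_take.mp hpw
    have h2 : (w ++ x).take p.length = w.take p.length := List.take_append_of_le_length hw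
    exact List.prefix_iff_eq_take.mpr (h1.trans h2)
  · intro hpw
    exact hpw.trans (List.prefix_append w x)

theorem cnt_closed (p : List Char) (hp : p ≠ []) :
    ∀ (u x : List Char), (∀ m < u.length, ¬ p <+: List.drop m (u ++ p ++ x)) →
      cnt p (u ++ p ++ x) = cnt p x + 1 := by
  intro u
  induction u with
  | nil =>
    intro x _
    simp only [List.nil_append]
    obtain ⟨a, b, rfl⟩ : ∃ a b, p = a :: b := by
      cases p with
      | nil => exact absurd rfl hp
      | cons a b => exact ⟨a, b, rfl⟩
    rw [List.cons_append, cnt, if_pos (List.isPrefixOf_iff_prefix.mpr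
      (by rw [← List.cons_append]; exact List.prefix_append _ _))]
    have hmax : max (a :: b).length 1 = b.length + 1 := by simp
    rw [hmax, List.drop_succ_cons, List.drop_left]
  | cons a u' ih =>
    intro x hnom
    have h0 := hnom 0 (by simp)
    simp only [List.drop_zero] at h0
    have hr : (a :: u') ++ p ++ x = a :: (u' ++ p ++ x) := by simp
    rw [hr] at h0 ⊢
    rw [cnt, if_neg (fun hpre => h0 (List.isPrefixOf_iff_prefix.mp hpre))]
    exact ih x (fun m hm => by
      have := hnom (m + 1) (by simp; omega)
      rw [hr] at this
      simpa using this)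

theorem solLoopA_run (p : List Char) (c : Nat) :
    ∀ (pre rest ans : List Char),
      (∀ m < pre.length, PySem.Chars.count (ans ++ pre.take m) p ≠ c) →
      solLoopA p c (pre ++ rest) ans = solLoopA p c rest (ans ++ pre) := by
  intro pre
  induction pre with
  | nil => intro rest ans _; simp
  | cons a pre' ih =>
    intro rest ans hm
    have h0 : PySem.Chars.count ans p ≠ c := by
      have := hm 0 (by simp)
      simpa using this
    rw [List.cons_append, solLoopA, if_neg h0]
    have := ih rest (ans ++ [a]) (fun m hmm => by
      have := hm (m + 1) (by simp; omega)
      simpa using this)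
    simpa using this

theorem solLoopA_factor (p : List Char) (hp : p ≠ []) (A0 : List Char) (k : Nat)
    (hA : ∀ x, cnt p (A0 ++ x) = cnt p x + k) :
    ∀ (rest y : List Char) (c : Nat),
      solLoopA p (c + k) rest (A0 ++ y) = A0 ++ solLoopA p c rest y := by
  intro rest
  induction rest with
  | nil => intro y c; simp [solLoopA]
  | cons i rest' ih =>
    intro y c
    have hiff : (PySem.Chars.count (A0 ++ y) p = c + k) ↔ (PySem.Chars.count y p = c) := by
      rw [count_eq_cnt p hp, count_eq_cnt p hp, hA y]
      omega
    by_cases hc : PySem.Chars.count y p = c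
    · rw [solLoopA, if_pos (hiff.mpr hc), solLoopA, if_pos hc]
    · rw [solLoopA, if_neg (fun h => hc (hiff.mp h)), solLoopA, if_neg hc]
      have := ih (y ++ [i]) c
      simpa using this

theorem length_pos_of_ne_nil' (p : List Char) (hp : p ≠ []) : 1 ≤ p.length := by
  cases p with
  | nil => exact absurd rfl hp
  | cons a b => simp

theorem lastEndB_shift_aux (p : List Char) (hp : p ≠ []) :
    ∀ (n : Nat) (l : List Char), l.length ≤ n →
      ∀ (off : Nat), lastEndB p l off off = off + lastEndB p l 0 0 := by
  intro n
  induction n with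
  | zero =>
    intro l hl off
    have : l = [] := List.eq_nil_of_length_eq_zero (Nat.le_zero.mp hl)
    subst this
    simp [lastEndB, List.isEmpty_iff, hp]
  | succ n ih =>
    intro l hl off
    match l with
    | [] => simp [lastEndB, List.isEmpty_iff, hp]
    | x :: t =>
      rw [lastEndB, lastEndB]
      by_cases hneg : PySem.Chars.find (x :: t) p < 0
      · simp only [hneg, if_pos]
        simp
      · simp only [hneg, if_false]
        have hplen := length_pos_of_ne_nil' p hp
        set j := (PySem.Chars.find (x :: t) p).toNat with hj
        have hstep : j + max p.length 1 = j + p.length := by omega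
        rw [hstep]
        have hlen : ((x :: t).drop (j + p.length)).length ≤ n := by
          simp at hl ⊢
          omega
        have h1 := ih _ hlen (off + (j + p.length))
        have h2 := ih _ hlen (0 + (j + p.length))
        have hacc1 : off + j + p.length = off + (j + p.length) := by omega
        have hacc2 : 0 + j + p.length = 0 + (j + p.length) := by omega
        rw [hacc1, h1, hacc2, h2]
        omega

theorem lastEndB_shift (p : List Char) (hp : p ≠ []) :
    ∀ (l : List Char) (off : Nat), lastEndB p l off off = off + lastEndB p l 0 0 := by
  intro l off
  exact lastEndB_shift_aux p hp l.length l (le_refl _) off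

theorem solLoopA_empty_pat :
    ∀ (l ans : List Char) (c : Nat), ans.length + l.length + 1 = c →
      solLoopA [] c l ans = ans ++ l := by
  intro l
  induction l with
  | nil => intro ans c _; simp [solLoopA]
  | cons x t ih =>
    intro ans c hc
    have hcount : PySem.Chars.count ans [] = ans.length + 1 := by
      simp [PySem.Chars.count]
    rw [solLoopA, if_neg (by rw [hcount]; simp at hc; omega)]
    have := ih (ans ++ [x]) c (by simp at hc ⊢; omega)
    simpa using this

theorem lastEndB_empty_pat :
    ∀ (l : List Char) (off acc : Nat), lastEndB [] l off acc = off + l.length := by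
  intro l
  induction l with
  | nil => intro off acc; simp [lastEndB]
  | cons x t ih =>
    intro off acc
    have hfind : PySem.Chars.find (x :: t) [] = 0 := by
      rw [PySem.Chars.find, PySem.Chars.find.go, if_pos (by simp [List.isPrefixOf])]
      simp
    rw [lastEndB, hfind]
    simp only [Int.toNat_zero]
    rw [if_neg (by norm_num)]
    simpa [ih] using by omega

theorem main_aux (p : List Char) (hp : p ≠ []) :
    ∀ (n : Nat) (l : List Char), l.length ≤ n →
      solLoopA p (cnt p l) l [] = List.take (lastEndB p l 0 0) l := by
  intro n
  induction n with
  | zero =>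
    intro l hl
    have : l = [] := List.eq_nil_of_length_eq_zero (Nat.le_zero.mp hl)
    subst this
    simp [solLoopA, lastEndB, List.isEmpty_iff, hp]
  | succ n ih =>
    intro l hl
    have hplen := length_pos_of_ne_nil' p hp
    by_cases hneg : PySem.Chars.find l p < 0
    · -- no occurrence: A breaks immediately, B keeps acc = 0
      have hfind : PySem.Chars.find l p = -1 := by
        have := PySem.Chars.neg_one_le_find l p
        omega
      have hninf : ¬ p <:+: l := (PySem.Chars.find_eq_neg_one_iff l p).mp hfind
      have hc : cnt p l = 0 := cnt_zero_of_no_infix p l hninf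
      have hL : solLoopA p (cnt p l) l [] = [] := by
        rw [hc]
        match l with
        | [] => rw [solLoopA]
        | x :: t =>
          rw [solLoopA, if_pos (by rw [count_eq_cnt p hp]; simp [cnt])]
      have hR : lastEndB p l 0 0 = 0 := by
        match l with
        | [] => simp [lastEndB, List.isEmpty_iff, hp]
        | x :: t => rw [lastEndB]; simp [hneg]
      rw [hL, hR]
      simp
    · -- first occurrence at j
      have hge : 0 ≤ PySem.Chars.find l p := by omega
      obtain ⟨hpre, hmin⟩ := PySem.Chars.find_spec hge
      set j := (PySem.Chars.find l p).toNat with hj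
      set d := j + p.length with hd
      have hjlen : j ≤ l.length := by
        have := PySem.Chars.find_le_length l p
        omega
      obtain ⟨r, hr⟩ := hpre
      have hdlen : d ≤ l.length := by
        have := congrArg List.length hr
        simp at this
        omega
      have htdl : List.take d l = List.take j l ++ p := by
        rw [hd, List.take_add, ← hr, List.take_left' rfl]
      have hrd : List.drop d l = r := by
        rw [hd, ← List.drop_drop, ← hr, List.drop_left]
      have hfull : l = (List.take j l ++ p) ++ r := by
        rw [← htdl, ← hrd, List.take_append_drop]
      -- transferring "no occurrence before j" across different tails
      have hnom : ∀ (x : List Char) (m : Nat), m < j →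
          ¬ p <+: List.drop m ((List.take j l ++ p) ++ x) := by
        intro x m hm hcontra
        apply hmin m hm
        have hmle : m ≤ (List.take j l ++ p).length := by
          simp
          omega
        have hwlen : p.length ≤ (List.drop m (List.take j l ++ p)).length := by
          simp
          omega
        rw [List.drop_append_of_le_length hmle] at hcontra
        have hw : p <+: List.drop m (List.take j l ++ p) :=
          (prefix_append_iff p _ x hwlen).mp hcontra
        have : p <+: List.drop m (List.take j l ++ p) ++ r :=
          (prefix_append_iff p _ r hwlen).mpr hw
        rw [← List.drop_append_of_le_length hmle, ← hfull] at this
        exact this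
      have hclosed : ∀ x, cnt p (List.take d l ++ x) = cnt p x + 1 := by
        intro x
        rw [htdl]
        apply cnt_closed p hp (List.take j l) x
        intro m hm
        have hmj : m < j := by
          simp at hm
          omega
        exact hnom x m hmj
      have hcnt : cnt p l = cnt p (List.drop d l) + 1 := by
        conv_lhs => rw [← List.take_append_drop d l]
        exact hclosed _
      have hprefix0 : ∀ m, m < d → cnt p (List.take m l) = 0 := by
        intro m hm
        apply cnt_zero_of_no_infix p
        intro hinf
        obtain ⟨q, hq⟩ := (PySem.Chars.exists_prefix_drop_iff_isIn p (List.take m l)).mpr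
          ((PySem.Chars.isIn_iff_infix p (List.take m l)).mpr hinf)
        have hqlen : p.length ≤ (List.drop q (List.take m l)).length := hq.length_le
        have hqm : q + p.length ≤ m := by
          simp at hqlen
          omega
        have hqj : q < j := by omega
        apply hmin q hqj
        rw [List.drop_take] at hq
        exact hq.trans (List.take_prefix _ _)
      have hlne : l ≠ [] := by
        intro h
        subst h
        exact absurd ((PySem.Chars.find_eq_neg_one_iff [] p).mpr
          (by rw [List.infix_nil]; exact hp)) (by omega)
      have hcpos : 1 ≤ cnt p l := by omega
      -- A: runs through take d l without breaking …
      have hstep1 : solLoopA p (cnt p l) l [] = solLoopA p (cnt p l) (List.drop d l) (List.take d l) := by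
        have hcond : ∀ m < (List.take d l).length,
            PySem.Chars.count ([] ++ List.take m (List.take d l)) p ≠ cnt p l := by
          intro m hm
          have hmd : m < d := by
            simp at hm
            omega
          rw [List.nil_append, List.take_take, count_eq_cnt p hp,
            Nat.min_eq_left (le_of_lt hmd), hprefix0 m hmd]
          omega
        have := solLoopA_run p (cnt p l) (List.take d l) (List.drop d l) [] hcond
        rw [List.take_append_drop] at this
        simpa using this
      -- … then factors out the closed prefix …
      have hstep2 : solLoopA p (cnt p l) (List.drop d l) (List.take d l) =
          List.take d l ++ solLoopA p (cnt p (List.drop d l)) (List.drop d l) [] := by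
        have := solLoopA_factor p hp (List.take d l) 1 hclosed (List.drop d l) []
          (cnt p (List.drop d l))
        rw [hcnt]
        simpa using this
      -- … and the rest is the same problem on the shorter suffix
      have hIH : solLoopA p (cnt p (List.drop d l)) (List.drop d l) [] =
          List.take (lastEndB p (List.drop d l) 0 0) (List.drop d l) := by
        apply ih
        simp
        omega
      -- B: one scan step reaches the same suffix
      have hRHS : lastEndB p l 0 0 = d + lastEndB p (List.drop d l) 0 0 := by
        match l, hlne with
        | x :: t, _ =>
          rw [lastEndB]
          simp only [hneg, if_false]
          have hmax : (PySem.Chars.find (x :: t) p).toNat + max p.length 1 = d := by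
            rw [hd, hj]
            omega
          rw [hmax]
          have hacc : 0 + (PySem.Chars.find (x :: t) p).toNat + p.length = d := by
            rw [hd, hj]
            omega
          rw [hacc, show (0 + d) = d by omega]
          exact lastEndB_shift p hp _ d
      rw [hstep1, hstep2, hIH, hRHS,
        List.take_add (l := l) (i := d) (j := lastEndB p (List.drop d l) 0 0)]

theorem main_eq (p : List Char) (hp : p ≠ []) :
    ∀ (l : List Char), solLoopA p (cnt p l) l [] = List.take (lastEndB p l 0 0) l := by
  intro l
  exact main_aux p hp l.length l (le_refl _)


-- ===== VERDICT (by name: the statement is the Claim_ definition above) =====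

theorem solution_spec : Claim_equal_solution := by
  unfold Claim_equal_solution Spec_solution
  intro s pat _
  unfold solution solution_alt
  congr 1
  by_cases hp : pat.toList = []
  · rw [hp]
    have hc : PySem.Chars.count s.toList [] = s.toList.length + 1 := by
      simp [PySem.Chars.count]
    rw [hc, solLoopA_empty_pat s.toList [] (s.toList.length + 1) (by simp),
      lastEndB_empty_pat s.toList 0 0]
    simp
  · rw [count_eq_cnt pat.toList hp s.toList]
    exact main_eq pat.toList hp s.toList
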